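-- pv_equiv track=rewrite | github.com/zgotter/algorithm-python | programmers/level1/035_예산_01.py | solution
-- ===== SOURCE A (Python) =====
-- from itertools import combinations
--
-- def solution(d, budget):
--     answer = 0
--     d.sort()
--     found = False
--     for i in range(len(d), 0, -1):
--         if not found:
--             for lst in combinations(d, i):
--                 if sum(list(lst)) == budget:
--                     answer = len(lst)
--                     found = True
--                     break
--     return answer
-- ===== SOURCE B (Python) =====
-- def solution(d, budget):
--     # One left-to-right pass building all achievable (subset-sum, subset-size)
--     # pairs, then a single scan for the largest size hitting the budget.
--     pairs = [(0, 0)]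
--     for x in d:
--         pairs = pairs + [(s + x, c + 1) for s, c in pairs]
--     best = 0
--     for s, c in pairs:
--         if s == budget and c > best:
--             best = c
--     return best
-- ===== Notes on version B (the rewrite author's own statement) =====
-- stated objective: alternative
-- what changed: Replaces the per-size scan over itertools.combinations (restarted for each size n..1 with a found flag, after an irrelevant sort) by a single left-to-right fold that accumulates all achievable (subset-sum, subset-size) pairs once, followed by one scan taking the largest size whose sum equals the budget.
import Mathlib
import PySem

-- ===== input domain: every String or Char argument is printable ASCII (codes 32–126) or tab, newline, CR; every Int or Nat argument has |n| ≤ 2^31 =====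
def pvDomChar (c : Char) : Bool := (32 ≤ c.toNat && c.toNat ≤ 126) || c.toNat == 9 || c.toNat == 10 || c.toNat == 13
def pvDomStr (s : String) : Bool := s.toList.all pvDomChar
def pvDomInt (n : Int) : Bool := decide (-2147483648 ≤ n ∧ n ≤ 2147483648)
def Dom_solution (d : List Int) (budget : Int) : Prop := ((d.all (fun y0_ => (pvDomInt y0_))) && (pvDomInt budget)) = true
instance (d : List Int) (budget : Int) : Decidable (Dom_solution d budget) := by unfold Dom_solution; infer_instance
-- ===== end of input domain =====

-- B replaces A's per-size combinations scan by one fold over all (subset-sum, size) pairs;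
-- equivalence is about the RETURN value only (A sorts its argument d in place, B does not).

-- ===== PORT A =====
-- itertools.combinations(l, k) as lists, in itertools order
def pyCombinations (k : Nat) (l : List Int) : List (List Int) :=
  match k, l with
  | 0, _ => [[]]
  | _ + 1, [] => []
  | k + 1, x :: xs => ((pyCombinations k xs).map (fun c => x :: c)) ++ pyCombinations (k + 1) xs

-- the inner 'for lst in combinations(d, i): … break' loop
def innerA (budget : Int) : List (List Int) → Int × Bool → Int × Bool
  | [], st => st
  | c :: rest, st =>
      if c.sum = budget then ((c.length : Int), true) else innerA budget rest st

def solution (d : List Int) (budget : Int) : Int :=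
  let ds := PySem.List.sorted d (fun x => x) false
  let st := (PySem.List.pyRange (ds.length : Int) 0 (-1)).foldl
    (fun st i => if st.2 = false then innerA budget (pyCombinations i.toNat ds) st else st)
    ((0 : Int), false)
  st.1

-- ===== PORT B =====
def solution_alt (d : List Int) (budget : Int) : Int :=
  let pairs := d.foldl
    (fun pairs x => pairs ++ pairs.map (fun p => (p.1 + x, p.2 + 1)))
    [((0 : Int), (0 : Int))]
  pairs.foldl (fun best p => if p.1 = budget ∧ p.2 > best then p.2 else best) 0

-- ===== PRECONDITION & SPEC =====
def Spec_solution (d : List Int) (budget : Int) (out : Int) : Prop := out = solution_alt d budget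
instance (d : List Int) (budget : Int) (out : Int) : Decidable (Spec_solution d budget out) := by unfold Spec_solution; infer_instance

-- ===== CLAIM (what is proved, stated in full; the proofs are below) =====
def Claim_equal_solution : Prop := ∀ (d : List Int) (budget : Int), Dom_solution d budget → Spec_solution d budget (solution d budget)

-- ===== LEMMAS AND PROOFS =====

-- k-subsets (as sublists up to permutation) of d with the given sum
def RchP (d : List Int) (k : Nat) (s : Int) : Prop :=
  ∃ S : List Int, S.Subperm d ∧ S.length = k ∧ S.sum = s

-- sublist-based version, used for the sorted copy inside A
def Rch (l : List Int) (k : Nat) (s : Int) : Prop :=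
  ∃ S : List Int, S.Sublist l ∧ S.length = k ∧ S.sum = s

theorem mem_pyCombinations (k : Nat) (l : List Int) (c : List Int) :
    c ∈ pyCombinations k l ↔ c.Sublist l ∧ c.length = k := by
  induction l generalizing k c with
  | nil =>
    cases k with
    | zero =>
      simp [pyCombinations, List.sublist_nil, List.length_eq_zero_iff]
    | succ k =>
      simp [pyCombinations, List.sublist_nil]
      rintro rfl
      simp
  | cons x xs ih =>
    cases k with
    | zero =>
      simp [pyCombinations, List.length_eq_zero_iff]
      rintro rfl
      exact List.nil_sublist _
    | succ k =>
      simp only [pyCombinations, List.mem_append, List.mem_map, ih, List.sublist_cons_iff]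
      constructor
      · rintro (⟨c', ⟨hs, hl⟩, rfl⟩ | ⟨hs, hl⟩)
        · exact ⟨Or.inr ⟨c', rfl, hs⟩, by simp [hl]⟩
        · exact ⟨Or.inl hs, hl⟩
      · rintro ⟨hs | ⟨r, rfl, hr⟩, hl⟩
        · exact Or.inr ⟨hs, hl⟩
        · exact Or.inl ⟨r, ⟨hr, by simpa using hl⟩, rfl⟩

theorem innerA_len_eq (budget : Int) (k : Nat) (cs : List (List Int)) (st : Int × Bool)
    (hlen : ∀ c ∈ cs, c.length = k) (hex : ∃ c ∈ cs, c.sum = budget) :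
    innerA budget cs st = ((k : Int), true) := by
  induction cs with
  | nil => simp at hex
  | cons c rest ih =>
    by_cases h : c.sum = budget
    · simp [innerA, h, hlen c (by simp)]
    · simp only [innerA, if_neg h]
      apply ih
      · intro c' hc'; exact hlen c' (by simp [hc'])
      · rcases hex with ⟨c', hc', hsum⟩
        rcases List.mem_cons.mp hc' with rfl | hc'
        · exact absurd hsum h
        · exact ⟨c', hc', hsum⟩

theorem innerA_pos (budget : Int) (k : Nat) (ds : List Int) (st : Int × Bool)
    (h : Rch ds k budget) :
    innerA budget (pyCombinations k ds) st = ((k : Int), true) := by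
  rcases h with ⟨S, hs, hl, hsum⟩
  apply innerA_len_eq
  · intro c hc; exact ((mem_pyCombinations k ds c).mp hc).2
  · exact ⟨S, (mem_pyCombinations k ds S).mpr ⟨hs, hl⟩, hsum⟩

theorem innerA_none (budget : Int) (cs : List (List Int)) (st : Int × Bool)
    (hno : ∀ c ∈ cs, c.sum ≠ budget) :
    innerA budget cs st = st := by
  induction cs with
  | nil => rfl
  | cons c rest ih =>
    simp only [innerA, if_neg (hno c (by simp))]
    exact ih (fun c' hc' => hno c' (by simp [hc']))

theorem innerA_neg (budget : Int) (k : Nat) (ds : List Int) (st : Int × Bool)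
    (h : ¬ Rch ds k budget) :
    innerA budget (pyCombinations k ds) st = st := by
  apply innerA_none
  intro c hc hsum
  rcases (mem_pyCombinations k ds c).mp hc with ⟨hs, hl⟩
  exact h ⟨c, hs, hl, hsum⟩

theorem foldl_found (budget : Int) (ds : List Int) (ks : List Int) (a : Int) :
    ks.foldl (fun st i => if st.2 = false then innerA budget (pyCombinations i.toNat ds) st else st)
      (a, true) = (a, true) := by
  induction ks with
  | nil => rfl
  | cons k ks ih => simpa using ih

theorem loopA (budget : Int) (ds : List Int) (n : Nat) :
    (let r := (PySem.List.pyRange (n : Int) 0 (-1)).foldl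
      (fun st i => if st.2 = false then innerA budget (pyCombinations i.toNat ds) st else st)
      ((0 : Int), false)
    (r.1 = 0 ∧ ∀ k : Nat, 1 ≤ k → k ≤ n → ¬ Rch ds k budget)
    ∨ (∃ m : Nat, 1 ≤ m ∧ m ≤ n ∧ r = ((m : Int), true) ∧ Rch ds m budget ∧
        ∀ k : Nat, m < k → k ≤ n → ¬ Rch ds k budget)) := by
  induction n with
  | zero =>
    rw [PySem.List.pyRange_neg_one_eq_nil (by norm_num)]
    exact Or.inl ⟨rfl, fun k hk hk0 _ => by omega⟩
  | succ n ih =>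
    rw [PySem.List.pyRange_neg_one_cons (by positivity)]
    rw [show ((n + 1 : Nat) : Int) - 1 = (n : Int) by push_cast; ring]
    simp only [List.foldl_cons]
    by_cases hr : Rch ds (n + 1) budget
    · simp only [if_true]
      rw [innerA_pos budget (((n + 1 : Nat) : Int)).toNat ds _ (by simpa using hr)]
      rw [foldl_found]
      refine Or.inr ⟨n + 1, by omega, by omega, ?_, hr, fun k h1 h2 _ => by omega⟩
      simp
    · simp only [if_true]
      rw [innerA_neg budget (((n + 1 : Nat) : Int)).toNat ds _ (by simpa using hr)]
      rcases ih with ⟨h0, hnone⟩ | ⟨m, h1, h2, h3, h4, h5⟩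
      · refine Or.inl ⟨h0, fun k hk1 hk2 hrk => ?_⟩
        rcases Nat.lt_or_ge k (n + 1) with h | h
        · exact hnone k hk1 (by omega) hrk
        · have hkeq : k = n + 1 := by omega
          exact hr (hkeq ▸ hrk)
      · refine Or.inr ⟨m, h1, by omega, h3, h4, fun k hk1 hk2 hrk => ?_⟩
        rcases Nat.lt_or_ge k (n + 1) with h | h
        · exact h5 k hk1 (by omega) hrk
        · have hkeq : k = n + 1 := by omega
          exact hr (hkeq ▸ hrk)

def pairsOf (d : List Int) : List (Int × Int) :=
  d.foldl (fun pairs x => pairs ++ pairs.map (fun p => (p.1 + x, p.2 + 1))) [((0 : Int), (0 : Int))]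

theorem sublist_concat_iff (S l : List Int) (x : Int) :
    S.Sublist (l ++ [x]) ↔ S.Sublist l ∨ ∃ S', S = S' ++ [x] ∧ S'.Sublist l := by
  rw [List.sublist_append_iff]
  constructor
  · rintro ⟨l1, l2, rfl, h1, h2⟩
    rcases List.sublist_singleton.mp h2 with rfl | rfl
    · exact Or.inl (by simpa using h1)
    · exact Or.inr ⟨l1, rfl, h1⟩
  · rintro (h | ⟨S', rfl, h⟩)
    · exact ⟨S, [], by simp, h, List.nil_sublist _⟩
    · exact ⟨S', [x], rfl, h, List.Sublist.refl _⟩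

theorem mem_pairsOf (d : List Int) (p : Int × Int) :
    p ∈ pairsOf d ↔ ∃ S : List Int, S.Sublist d ∧ p = (S.sum, (S.length : Int)) := by
  induction d using List.reverseRecOn generalizing p with
  | nil =>
    simp only [pairsOf, List.foldl_nil, List.mem_singleton]
    constructor
    · rintro rfl; exact ⟨[], List.nil_sublist _, rfl⟩
    · rintro ⟨S, hs, rfl⟩
      rw [List.sublist_nil] at hs; subst hs; rfl
  | append_singleton l x ih =>
    have hstep : pairsOf (l ++ [x]) =
        pairsOf l ++ (pairsOf l).map (fun p => (p.1 + x, p.2 + 1)) := by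
      simp [pairsOf, List.foldl_append]
    rw [hstep]
    simp only [List.mem_append, List.mem_map]
    constructor
    · rintro (hq | ⟨q, hq, rfl⟩)
      · rcases (ih _).mp hq with ⟨S, hs, rfl⟩
        exact ⟨S, hs.trans (List.sublist_append_left l [x]), rfl⟩
      · rcases (ih q).mp hq with ⟨S, hs, rfl⟩
        refine ⟨S ++ [x], hs.append (List.Sublist.refl _), ?_⟩
        simp
    · rintro ⟨S, hs, rfl⟩
      rcases (sublist_concat_iff S l x).mp hs with h | ⟨S', rfl, h⟩
      · exact Or.inl ((ih _).mpr ⟨S, h, rfl⟩)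
      · refine Or.inr ⟨(S'.sum, (S'.length : Int)), (ih _).mpr ⟨S', h, rfl⟩, ?_⟩
        simp

theorem maxfold (budget : Int) (P : List (Int × Int)) (b0 : Int) :
    (let r := P.foldl (fun best p => if p.1 = budget ∧ p.2 > best then p.2 else best) b0
    b0 ≤ r ∧ (r = b0 ∨ ∃ p ∈ P, p.1 = budget ∧ p.2 = r) ∧
      (∀ p ∈ P, p.1 = budget → p.2 ≤ r)) := by
  induction P generalizing b0 with
  | nil => exact ⟨le_refl _, Or.inl rfl, by simp⟩
  | cons q P ih =>
    simp only [List.foldl_cons]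
    obtain ⟨ihle, ihor, ihmax⟩ := ih (if q.1 = budget ∧ q.2 > b0 then q.2 else b0)
    have hb0 : b0 ≤ (if q.1 = budget ∧ q.2 > b0 then q.2 else b0) := by
      split_ifs with h
      · exact le_of_lt h.2
      · exact le_refl _
    refine ⟨hb0.trans ihle, ?_, ?_⟩
    · rcases ihor with h | ⟨p, hp, h1, h2⟩
      · rw [h]
        split_ifs with hq
        · exact Or.inr ⟨q, by simp, hq.1, rfl⟩
        · exact Or.inl rfl
      · exact Or.inr ⟨p, by simp [hp], h1, h2⟩
    · intro p hp hbud
      rcases List.mem_cons.mp hp with rfl | hp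
      · refine le_trans ?_ ihle
        split_ifs with h
        · exact le_refl _
        · have := not_and.mp h hbud
          omega
      · exact ihmax p hp hbud

-- the value both programs compute, pinned down uniquely
def Good (d : List Int) (budget : Int) (r : Int) : Prop :=
  0 ≤ r ∧ (r = 0 ∨ (1 ≤ r ∧ RchP d r.toNat budget)) ∧
    ∀ k : Nat, 1 ≤ k → RchP d k budget → (k : Int) ≤ r

theorem Good_unique (d : List Int) (budget : Int) (r1 r2 : Int)
    (h1 : Good d budget r1) (h2 : Good d budget r2) : r1 = r2 := by
  obtain ⟨h1n, h1or, h1max⟩ := h1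
  obtain ⟨h2n, h2or, h2max⟩ := h2
  rcases h1or with h1z | ⟨h11, h1r⟩ <;> rcases h2or with h2z | ⟨h21, h2r⟩
  · omega
  · have := h1max r2.toNat (by omega) h2r
    omega
  · have := h2max r1.toNat (by omega) h1r
    omega
  · have a := h1max r2.toNat (by omega) h2r
    have b := h2max r1.toNat (by omega) h1r
    omega

theorem Rch_sorted_iff (d : List Int) (k : Nat) (s : Int) :
    Rch (PySem.List.sorted d (fun x => x) false) k s ↔ RchP d k s := by
  have hperm := PySem.List.sorted_perm d (fun x => x) false
  constructor
  · rintro ⟨S, hs, hl, hsum⟩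
    exact ⟨S, (hperm.subperm_left).mp hs.subperm, hl, hsum⟩
  · rintro ⟨S, hs, hl, hsum⟩
    have h2 : S.Subperm (PySem.List.sorted d (fun x => x) false) :=
      (hperm.subperm_left).mpr hs
    rcases h2 with ⟨S', hp, hsub⟩
    exact ⟨S', hsub, by rw [hp.length_eq, hl], by rw [hp.sum_eq, hsum]⟩

theorem Good_solution (d : List Int) (budget : Int) : Good d budget (solution d budget) := by
  unfold solution
  have h := loopA budget (PySem.List.sorted d (fun x => x) false)
    ((PySem.List.sorted d (fun x => x) false).length)
  simp only at h ⊢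
  rcases h with ⟨h0, hnone⟩ | ⟨m, h1, h2, h3, h4, h5⟩
  · rw [h0]
    refine ⟨le_refl _, Or.inl rfl, fun k hk hrch => ?_⟩
    have hr := (Rch_sorted_iff d k budget).mpr hrch
    have hle : k ≤ (PySem.List.sorted d (fun x => x) false).length := by
      rcases hr with ⟨S, hs, hl, _⟩
      rw [← hl]; exact hs.length_le
    exact absurd hr (hnone k hk hle)
  · rw [h3]
    dsimp only
    refine ⟨by positivity, Or.inr ⟨by exact_mod_cast h1, ?_⟩, fun k hk hrch => ?_⟩
    · rw [Int.toNat_natCast]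
      exact (Rch_sorted_iff d m budget).mp h4
    · have hr := (Rch_sorted_iff d k budget).mpr hrch
      have hle : k ≤ (PySem.List.sorted d (fun x => x) false).length := by
        rcases hr with ⟨S, hs, hl, _⟩
        rw [← hl]; exact hs.length_le
      by_contra hgt
      rw [not_le] at hgt
      have hmk : m < k := by exact_mod_cast hgt
      exact h5 k hmk hle hr

theorem Good_solution_alt (d : List Int) (budget : Int) : Good d budget (solution_alt d budget) := by
  unfold solution_alt
  obtain ⟨hle, hor, hmax⟩ := maxfold budget (pairsOf d) 0
  simp only [pairsOf] at hle hor hmax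
  refine ⟨hle, ?_, ?_⟩
  · rcases hor with h | ⟨p, hp, hbud, hval⟩
    · exact Or.inl h
    · have hp' := (mem_pairsOf d p).mp (by simpa [pairsOf] using hp)
      rcases hp' with ⟨S, hs, rfl⟩
      have hval' : (S.length : Int) = _ := hval
      rcases Nat.eq_zero_or_pos S.length with h0 | hpos
      · exact Or.inl (by rw [← hval']; simp [h0])
      · refine Or.inr ⟨by rw [← hval']; exact_mod_cast hpos, ?_⟩
        rw [← hval', Int.toNat_natCast]
        exact ⟨S, hs.subperm, rfl, hbud⟩
  · intro k hk hrch
    rcases hrch with ⟨S, hs, hl, hsum⟩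
    rcases hs with ⟨S', hp, hsub⟩
    have hmem : (S'.sum, (S'.length : Int)) ∈ pairsOf d :=
      (mem_pairsOf d _).mpr ⟨S', hsub, rfl⟩
    have hres := hmax _ (by simpa [pairsOf] using hmem) (by rw [hp.sum_eq, hsum])
    rw [hp.length_eq, hl] at hres
    exact hres

-- ===== VERDICT (by name: the statement is the Claim_ definition above) =====
theorem solution_spec : Claim_equal_solution := by
  intro d budget _
  unfold Spec_solution
  exact Good_unique d budget _ _ (Good_solution d budget) (Good_solution_alt d budget)
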